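-- pv_equiv track=rewrite | github.com/Harito97/UniManager | backend/api/forms/renderSendData.py | subject
-- ===== SOURCE A (Python) =====
-- def subject(data):
--     max_he4_dict = {}
--
--     for item in data:
--         ma_hp = item["ma_hp"]
--         he4 = item["he4"]
--
--         if ma_hp not in max_he4_dict or he4 > max_he4_dict[ma_hp]["he4"]:
--             max_he4_dict[ma_hp] = {"ma_hp": ma_hp,
--                                    "he4": he4, "so_tin": item["so_tin"]}
--
--     result = list(max_he4_dict.values())
--     return result
-- ===== SOURCE B (Python) =====
-- def subject(data):
--     groups = {}
--     for item in data:
--         groups.setdefault(item["ma_hp"], []).append(item)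
--     result = []
--     for ma_hp, group in groups.items():
--         winner = max(group, key=lambda x: x["he4"])
--         result.append({"ma_hp": ma_hp,
--                        "he4": winner["he4"], "so_tin": winner["so_tin"]})
--     return result
-- ===== Notes on version B (the rewrite author's own statement) =====
-- stated objective: alternative
-- what changed: Replaces A's single streaming running-max dict with a two-pass group-then-reduce: first bucket items by ma_hp in insertion order, then pick each group's winner with max(key=he4) (first maximal, matching A's strict-> update) and build the result rows.
import Mathlib
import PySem

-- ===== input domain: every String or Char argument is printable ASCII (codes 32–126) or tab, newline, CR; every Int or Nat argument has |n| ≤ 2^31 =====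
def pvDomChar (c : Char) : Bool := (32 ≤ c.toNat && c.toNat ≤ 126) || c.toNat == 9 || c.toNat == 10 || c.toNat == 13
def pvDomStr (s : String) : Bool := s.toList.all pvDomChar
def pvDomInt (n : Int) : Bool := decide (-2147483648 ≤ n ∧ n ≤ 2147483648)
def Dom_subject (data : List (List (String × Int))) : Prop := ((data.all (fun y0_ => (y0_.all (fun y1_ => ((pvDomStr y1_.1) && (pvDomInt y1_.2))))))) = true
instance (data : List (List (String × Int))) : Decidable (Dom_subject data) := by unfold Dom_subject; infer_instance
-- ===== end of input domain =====

-- B replaces A's streaming running-max dict by group-by-key then max(key=he4) per group (alternative decomposition, same cost).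

-- ===== PORT A =====
-- A: one pass keeping, per ma_hp, the row of the item with the strictly largest he4 so far.
-- item["k"] is ported as (List.lookup "k" item).getD 0; Pre_subject guarantees the key is present
-- (Python raises KeyError otherwise), and the stored row always carries "he4" by construction, so getD 0 is exact.
def subjectStep (d : PySem.Dict Int (List (String × Int))) (item : List (String × Int)) :
    PySem.Dict Int (List (String × Int)) :=
  if d.contains ((List.lookup "ma_hp" item).getD 0) = false
      ∨ ((d.getD ((List.lookup "ma_hp" item).getD 0) []).lookup "he4").getD 0
          < (List.lookup "he4" item).getD 0 then
    d.insert ((List.lookup "ma_hp" item).getD 0)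
      [("ma_hp", (List.lookup "ma_hp" item).getD 0),
       ("he4", (List.lookup "he4" item).getD 0),
       ("so_tin", (List.lookup "so_tin" item).getD 0)]
  else d

def subject (data : List (List (String × Int))) : List (List (String × Int)) :=
  (data.foldl subjectStep PySem.Dict.empty).values

-- ===== PORT B =====
-- B pass 1: bucket the items by ma_hp, keys in first-appearance order (dict.setdefault(...).append).
def groupStep (g : PySem.Dict Int (List (List (String × Int)))) (item : List (String × Int)) :
    PySem.Dict Int (List (List (String × Int))) :=
  g.modify ((List.lookup "ma_hp" item).getD 0) [] (fun l => l ++ [item])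

-- B pass 2: per group, winner = max(group, key=lambda x: x["he4"]) (first maximal), then the result row.
def winnerRow (p : Int × List (List (String × Int))) : List (String × Int) :=
  let w := PySem.List.maxD p.2 (fun x => ((List.lookup "he4" x).getD 0 : Int)) []
  [("ma_hp", p.1), ("he4", (List.lookup "he4" w).getD 0), ("so_tin", (List.lookup "so_tin" w).getD 0)]

def subject_alt (data : List (List (String × Int))) : List (List (String × Int)) :=
  ((data.foldl groupStep PySem.Dict.empty).items).map winnerRow

-- ===== PRECONDITION & SPEC =====
-- Pre_ excludes items missing one of the keys "ma_hp"/"he4"/"so_tin": Python A raises KeyError on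
-- almost all such inputs (it reads ma_hp and he4 of every item, and so_tin of every running maximum);
-- on the rest (so_tin missing only on items that never become the running maximum) A's returning at
-- all is an accident of which intermediates the streaming pass happens to read.
def Pre_subject (data : List (List (String × Int))) : Prop :=
  (data.all (fun item => (List.lookup "ma_hp" item).isSome
      && (List.lookup "he4" item).isSome && (List.lookup "so_tin" item).isSome)) = true
instance (data : List (List (String × Int))) : Decidable (Pre_subject data) := by unfold Pre_subject; infer_instance

def pvWitness_subject : (List (List (String × Int))) :=
  [[("ma_hp", 1), ("he4", 5), ("so_tin", 9)], [("ma_hp", 1), ("he4", 3), ("so_tin", 2)]]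

def Spec_subject (data : List (List (String × Int))) (out : List (List (String × Int))) : Prop := out = subject_alt data
instance (data : List (List (String × Int))) (out : List (List (String × Int))) : Decidable (Spec_subject data out) := by unfold Spec_subject; infer_instance

-- ===== CLAIM (what is proved, stated in full; the proofs are below) =====
def Claim_equal_subject : Prop := ∀ (data : List (List (String × Int))), Dom_subject data → Pre_subject data → Spec_subject data (subject data)

-- ===== LEMMAS AND PROOFS =====

-- the he4 sort key used by B
def heKey (x : List (String × Int)) : Int := (List.lookup "he4" x).getD 0

-- B's comparison step: Python's max keeps the earlier element on ties (strict <)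
def wstep (m x : List (String × Int)) : List (String × Int) := if heKey m < heKey x then x else m

lemma max?_cons (xs : List (List (String × Int))) :
    ∀ x, PySem.List.max? (x :: xs) heKey = some (xs.foldl wstep x) := by
  induction xs with
  | nil => intro x; rfl
  | cons y ys ih =>
      intro x
      have h1 : PySem.List.max? (x :: y :: ys) heKey = PySem.List.max? (wstep x y :: ys) heKey := by
        unfold PySem.List.max?
        simp only [List.foldl_cons]
        congr 1
        by_cases hxy : heKey x < heKey y <;> simp [wstep, hxy]
      rw [h1, ih (wstep x y), List.foldl_cons]

-- B's winner of a group, as a plain fold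
def winner (grp : List (List (String × Int))) : List (String × Int) :=
  PySem.List.maxD grp heKey []

lemma winner_cons_foldl (x : List (String × Int)) (xs : List (List (String × Int))) :
    winner (x :: xs) = xs.foldl wstep x := by
  simp [winner, PySem.List.maxD, max?_cons]

lemma winner_singleton (x : List (String × Int)) : winner [x] = x := by
  simp [winner_cons_foldl]

lemma winner_append_singleton (grp : List (List (String × Int))) (x : List (String × Int))
    (h : grp ≠ []) :
    winner (grp ++ [x]) = if heKey (winner grp) < heKey x then x else winner grp := by
  obtain ⟨y, ys, rfl⟩ := List.exists_cons_of_ne_nil h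
  rw [List.cons_append, winner_cons_foldl y (ys ++ [x]), List.foldl_append, winner_cons_foldl y ys]
  rfl

lemma winnerRow_eq (k : Int) (grp : List (List (String × Int))) :
    winnerRow (k, grp) =
      [("ma_hp", k), ("he4", heKey (winner grp)),
       ("so_tin", (List.lookup "so_tin" (winner grp)).getD 0)] := by
  rfl

lemma lookup_he4_winnerRow (k : Int) (grp : List (List (String × Int))) :
    (List.lookup "he4" (winnerRow (k, grp))).getD 0 = heKey (winner grp) := by
  rw [winnerRow_eq]
  simp [List.lookup]

-- invariant: A's dict carries exactly the winner row of each of B's groups, in the same key order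
lemma main_inv (data : List (List (String × Int)))
    (d : PySem.Dict Int (List (String × Int)))
    (g : PySem.Dict Int (List (List (String × Int))))
    (hitems : d.items = g.items.map (fun p => (p.1, winnerRow p)))
    (hne : ∀ p ∈ g.items, p.2 ≠ [])
    (hnd : g.keys.Nodup) :
    (data.foldl subjectStep d).items =
      (data.foldl groupStep g).items.map (fun p => (p.1, winnerRow p)) := by
  induction data generalizing d g with
  | nil => exact hitems
  | cons item rest ih =>
      simp only [List.foldl]
      set k : Int := (List.lookup "ma_hp" item).getD 0 with hk
      have hkeys : d.keys = g.keys := by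
        simp [PySem.Dict.keys, hitems, Function.comp]
      have hdnd : d.keys.Nodup := hkeys ▸ hnd
      have hcont : d.contains k = g.contains k := by
        rw [PySem.Dict.contains_eq_decide_mem_keys, PySem.Dict.contains_eq_decide_mem_keys, hkeys]
      have hhe : (List.lookup "he4" item).getD 0 = heKey item := rfl
      by_cases hc : g.contains k = true
      · -- key already present: g has a nonempty group grp at k
        have hget : ∃ grp, g.get? k = some grp := by
          have := PySem.Dict.contains_eq_isSome_get? g k
          rw [hc] at this
          exact Option.isSome_iff_exists.mp this.symm
        obtain ⟨grp, hgrp⟩ := hget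
        have hmem : (k, grp) ∈ g.items := PySem.Dict.mem_items_of_get?_eq_some g hgrp
        have hgrpne : grp ≠ [] := hne _ hmem
        have hdget : d.get? k = some (winnerRow (k, grp)) := by
          apply PySem.Dict.get?_of_mem_items d _ hdnd
          rw [hitems]
          exact List.mem_map_of_mem hmem
        have hdgetD : d.getD k [] = winnerRow (k, grp) :=
          PySem.Dict.getD_of_get?_eq_some d [] hdget
        have hggetD : g.getD k [] = grp := PySem.Dict.getD_of_get?_eq_some g [] hgrp
        have hstep : subjectStep d item =
            if heKey (winner grp) < heKey item then
              d.insert k [("ma_hp", k), ("he4", heKey item),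
                          ("so_tin", (List.lookup "so_tin" item).getD 0)]
            else d := by
          rw [subjectStep, ← hk, hhe, hdgetD, hcont, hc, lookup_he4_winnerRow]
          simp
        have hgstep : groupStep g item = g.insert k (grp ++ [item]) := by
          rw [groupStep, PySem.Dict.modify, ← hk, hggetD]
        have hwin : winnerRow (k, grp ++ [item]) =
            if heKey (winner grp) < heKey item then
              [("ma_hp", k), ("he4", heKey item),
               ("so_tin", (List.lookup "so_tin" item).getD 0)]
            else winnerRow (k, grp) := by
          rw [winnerRow_eq, winnerRow_eq, winner_append_singleton grp item hgrpne]
          by_cases hlt : heKey (winner grp) < heKey item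
          · rw [if_pos hlt, if_pos hlt]
          · rw [if_neg hlt, if_neg hlt]
        have harg : (subjectStep d item).items =
            (groupStep g item).items.map (fun p => (p.1, winnerRow p)) := by
          rw [hgstep, PySem.Dict.items_insert_of_contains g _ hc]
          by_cases hlt : heKey (winner grp) < heKey item
          · rw [hstep, if_pos hlt, PySem.Dict.items_insert_of_contains d _
                (by rw [hcont]; exact hc), hitems, List.map_map, List.map_map]
            apply List.map_congr_left
            intro q hq
            by_cases hqk : (q.1 == k) = true
            · simp [Function.comp, hqk, hwin, hlt]
            · simp [Function.comp, hqk]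
          · rw [hstep, if_neg hlt, hitems, List.map_map]
            apply List.map_congr_left
            intro q hq
            by_cases hqk : (q.1 == k) = true
            · have hq1 : q.1 = k := by simpa using hqk
              have hmemq : (k, q.2) ∈ g.items := by rw [← hq1]; simpa using hq
              have hq2 : q.2 = grp := by
                have := PySem.Dict.get?_of_mem_items g hmemq hnd
                rw [hgrp] at this
                exact (Option.some_inj.mp this).symm
              have hqe : q = (k, grp) := by rw [← hq1, ← hq2]
              simp [Function.comp, hwin, hlt, hqe]
            · simp [Function.comp, hqk]
        apply ih _ _ harg
        · intro p hp
          rw [hgstep, PySem.Dict.items_insert_of_contains g _ hc] at hp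
          obtain ⟨q, hq, rfl⟩ := List.mem_map.mp hp
          by_cases hqk : (q.1 == k) = true
          · simp [hqk]
          · simpa [hqk] using hne _ hq
        · rw [hgstep]; exact PySem.Dict.nodup_keys_insert g _ _ hnd
      · -- new key: both sides append
        have hgc : g.contains k = false := by simpa using hc
        have hdc : d.contains k = false := by rw [hcont]; exact hgc
        have hggetD : g.getD k [] = [] := PySem.Dict.getD_of_not_contains g [] hgc
        have hstep : subjectStep d item =
            d.insert k [("ma_hp", k), ("he4", heKey item),
                        ("so_tin", (List.lookup "so_tin" item).getD 0)] := by
          rw [subjectStep, ← hk, hhe, hdc]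
          simp
        have hgstep : groupStep g item = g.insert k [item] := by
          rw [groupStep, PySem.Dict.modify, ← hk, hggetD]
          rfl
        have harg : (subjectStep d item).items =
            (groupStep g item).items.map (fun p => (p.1, winnerRow p)) := by
          rw [hstep, hgstep, PySem.Dict.items_insert_of_not_contains d _ hdc,
              PySem.Dict.items_insert_of_not_contains g _ hgc, List.map_append, hitems,
              List.map_cons, List.map_nil, winnerRow_eq, winner_singleton]
        apply ih _ _ harg
        · intro p hp
          rw [hgstep, PySem.Dict.items_insert_of_not_contains g _ hgc] at hp
          rcases List.mem_append.mp hp with h | h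
          · exact hne _ h
          · simp at h
            simp [h]
        · rw [hgstep]; exact PySem.Dict.nodup_keys_insert g _ _ hnd

-- ===== VERDICT (by name: the statement is the Claim_ definition above) =====
theorem subject_spec : Claim_equal_subject := by
  intro data _ _
  unfold Spec_subject subject subject_alt
  have h := main_inv data PySem.Dict.empty PySem.Dict.empty (by rfl) (by simp [PySem.Dict.empty])
    PySem.Dict.nodup_keys_empty
  rw [PySem.Dict.values, h, List.map_map]
  rfl
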